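-- pv_equiv track=rewrite | github.com/Scho1s/HackerRankExercises | TEST1.py | missingCharacters
-- ===== SOURCE A (Python) =====
-- def missingCharacters(s):
--     chars = list('0123456789abcdefghijklmnopqrstuvwxyz')
--     for _ in s.lower():
--         try:
--             chars.remove(_)
--         except:
--             pass
--     return "".join(chars)
-- ===== SOURCE B (Python) =====
-- def missingCharacters(s):
--     present = set(s.lower())
--     return "".join(c for c in '0123456789abcdefghijklmnopqrstuvwxyz' if c not in present)
-- ===== Notes on version B (the rewrite author's own statement) =====
-- stated objective: faster
-- what changed: Instead of iterating over the input and destructively removing each character from a mutable 36-element alphabet list (a linear scan plus exception per character), B builds a set of the lowercased input once and filters the fixed alphabet by set membership.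
import Mathlib
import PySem

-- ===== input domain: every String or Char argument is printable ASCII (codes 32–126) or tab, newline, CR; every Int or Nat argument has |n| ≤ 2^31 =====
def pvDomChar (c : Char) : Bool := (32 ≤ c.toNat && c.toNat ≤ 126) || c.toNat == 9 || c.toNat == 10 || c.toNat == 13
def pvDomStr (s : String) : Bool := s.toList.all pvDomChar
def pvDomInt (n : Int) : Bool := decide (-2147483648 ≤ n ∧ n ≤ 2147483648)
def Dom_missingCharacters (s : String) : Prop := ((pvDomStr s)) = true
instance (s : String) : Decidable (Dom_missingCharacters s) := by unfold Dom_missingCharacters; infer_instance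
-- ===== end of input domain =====

-- B builds the set of lowercased input characters once and filters the fixed alphabet by membership,
-- instead of A's scan over the input removing from a mutable alphabet list. Idiomatic rewrite; exact equivalence.

-- ===== PORT A =====
def missingCharacters (s : String) : String :=
  let chars := "0123456789abcdefghijklmnopqrstuvwxyz".toList
  let chars := (PySem.Str.lower s).toList.foldl
    (fun cs c =>
      match PySem.List.remove? cs c with      -- chars.remove(_) ; except: pass
      | some cs' => cs'
      | none => cs) chars
  String.ofList chars

-- ===== PORT B =====
def missingCharacters_alt (s : String) : String :=
  let present : PySem.Set Char := PySem.Set.ofList (PySem.Str.lower s).toList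
  String.ofList ("0123456789abcdefghijklmnopqrstuvwxyz".toList.filter
    (fun c => !(PySem.Set.contains present c)))

-- ===== PRECONDITION & SPEC =====
def Spec_missingCharacters (s : String) (out : String) : Prop := out = missingCharacters_alt s
instance (s : String) (out : String) : Decidable (Spec_missingCharacters s out) := by unfold Spec_missingCharacters; infer_instance

-- ===== CLAIM (what is proved, stated in full; the proofs are below) =====
def Claim_equal_missingCharacters : Prop := ∀ (s : String), Dom_missingCharacters s → Spec_missingCharacters s (missingCharacters s)

-- ===== LEMMAS AND PROOFS =====

-- folding one-occurrence removal over l, starting from a duplicate-free list, deletes exactly the members of l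
theorem fold_remove_eq_filter (l : List Char) (cs : List Char) (h : cs.Nodup) :
    l.foldl (fun cs c => match PySem.List.remove? cs c with
      | some cs' => cs' | none => cs) cs
    = cs.filter (fun c => !l.contains c) := by
  induction l generalizing cs with
  | nil => simp
  | cons c l ih =>
    have step : (match PySem.List.remove? cs c with
        | some cs' => cs' | none => cs) = cs.filter (fun x => x ≠ c) := by
      by_cases hc : c ∈ cs
      · rw [PySem.List.remove?_eq_some_erase cs c hc]
        have := List.Nodup.erase_eq_filter h c
        simpa using this
      · rw [(PySem.List.remove?_eq_none_iff cs c).2 hc]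
        symm
        apply List.filter_eq_self.2
        intro x hx
        simp only [decide_eq_true_eq]
        exact fun e => hc (e ▸ hx)
    simp only [List.foldl_cons, step]
    rw [ih _ (h.filter _), List.filter_filter]
    apply List.filter_congr
    intro x _
    simp [eq_comm]
    exact Bool.and_comm _ _

-- ===== VERDICT (by name: the statement is the Claim_ definition above) =====
theorem missingCharacters_spec : Claim_equal_missingCharacters := by
  intro s _
  unfold Spec_missingCharacters
  simp only [missingCharacters, missingCharacters_alt]
  rw [fold_remove_eq_filter _ _ (by decide)]
  congr 1
  apply List.filter_congr
  intro x _
  simp [PySem.Set.mem_ofList]
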